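-- pv_equiv track=rewrite | github.com/AdamZhouSE/pythonHomework | Code/CodeRecords/2974/60670/304325.py | zhenghui
-- ===== SOURCE A (Python) =====
-- def zhenghui(ss,typ):
--     nn=len(ss)
--     if nn%2==typ:# 0正回文 1非正回文
--         return False
--     else:
--         l=0
--         r=nn-1
--         while l<r:
--             if ss[l]!=ss[r]:
--                 return False
--             else:
--                 l+=1
--                 r-=1
--         return True
-- ===== SOURCE B (Python) =====
-- def zhenghui(ss, typ):
--     nn = len(ss)
--     return nn % 2 != typ and ss == ss[::-1]
-- ===== Notes on version B (the rewrite author's own statement) =====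
-- stated objective: idiomatic
-- what changed: Replaces the branch-and-two-pointer inward scan with a single short-circuit boolean expression using full-reversal comparison ss == ss[::-1].
import Mathlib
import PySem

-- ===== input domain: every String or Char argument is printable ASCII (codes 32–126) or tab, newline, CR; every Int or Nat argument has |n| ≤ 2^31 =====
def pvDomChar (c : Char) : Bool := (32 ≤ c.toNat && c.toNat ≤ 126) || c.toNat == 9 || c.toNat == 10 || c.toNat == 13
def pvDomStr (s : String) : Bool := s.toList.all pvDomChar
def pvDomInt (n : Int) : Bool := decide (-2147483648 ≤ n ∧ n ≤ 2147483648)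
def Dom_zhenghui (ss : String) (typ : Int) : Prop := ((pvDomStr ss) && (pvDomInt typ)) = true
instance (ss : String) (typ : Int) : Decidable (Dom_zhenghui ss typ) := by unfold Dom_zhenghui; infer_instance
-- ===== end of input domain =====

-- B replaces A's parity branch + two-pointer inward scan by one short-circuit
-- boolean expression with a full-reversal comparison (idiomatic; same asymptotic cost).

-- ===== PORT A =====
-- the while loop of A: walk l up and r down, comparing characters
-- (indices stay in range while l < r, so pyGetD with a dummy default is exact)
def zhLoop (cs : List Char) (l r : Int) : Bool :=
  if l < r then
    if PySem.List.pyGetD cs l ' ' ≠ PySem.List.pyGetD cs r ' ' then false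
    else zhLoop cs (l + 1) (r - 1)
  else true
termination_by (r - l).toNat
decreasing_by simp_wf; omega

def zhenghui (ss : String) (typ : Int) : Bool :=
  let nn : Int := PySem.Str.len ss
  if PySem.Int.mod nn 2 = typ then false
  else zhLoop ss.toList 0 (nn - 1)

-- ===== PORT B =====
def zhenghui_alt (ss : String) (typ : Int) : Bool :=
  let nn : Int := PySem.Str.len ss
  decide (PySem.Int.mod nn 2 ≠ typ) &&
    (match PySem.Str.slice? ss none none (-1) with
     | some rev => ss == rev
     | none => false)

-- ===== PRECONDITION & SPEC =====
def Spec_zhenghui (ss : String) (typ : Int) (out : Bool) : Prop := out = zhenghui_alt ss typ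
instance (ss : String) (typ : Int) (out : Bool) : Decidable (Spec_zhenghui ss typ out) := by unfold Spec_zhenghui; infer_instance

-- ===== CLAIM (what is proved, stated in full; the proofs are below) =====
def Claim_equal_zhenghui : Prop := ∀ (ss : String) (typ : Int), Dom_zhenghui ss typ → Spec_zhenghui ss typ (zhenghui ss typ)

-- ===== LEMMAS AND PROOFS =====

-- running the loop on the middle of a :: xs ++ [b] is running it on xs
theorem zhLoop_shift (xs : List Char) (a b : Char) (l r : Int)
    (hl : 0 ≤ l) (hr : r < xs.length) :
    zhLoop (a :: (xs ++ [b])) (l + 1) (r + 1) = zhLoop xs l r := by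
  conv_lhs => rw [zhLoop]
  conv_rhs => rw [zhLoop]
  by_cases h : l < r
  · have h1 : l + 1 < r + 1 := by omega
    rw [if_pos h1, if_pos h]
    have e1 : PySem.List.pyGetD (a :: (xs ++ [b])) (l + 1) ' ' = PySem.List.pyGetD xs l ' ' := by
      rw [PySem.List.pyGetD_eq_getElem _ ' ' (by omega) (by simp; omega),
          PySem.List.pyGetD_eq_getElem _ ' ' hl (by omega)]
      have ht : (l + 1).toNat = l.toNat + 1 := by omega
      simp only [ht, List.getElem_cons_succ]
      rw [List.getElem_append_left (by omega)]
    have e2 : PySem.List.pyGetD (a :: (xs ++ [b])) (r + 1) ' ' = PySem.List.pyGetD xs r ' ' := by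
      rw [PySem.List.pyGetD_eq_getElem _ ' ' (by omega) (by simp; omega),
          PySem.List.pyGetD_eq_getElem _ ' ' (by omega) (by omega)]
      have ht : (r + 1).toNat = r.toNat + 1 := by omega
      simp only [ht, List.getElem_cons_succ]
      rw [List.getElem_append_left (by omega)]
    rw [e1, e2]
    by_cases hab : PySem.List.pyGetD xs l ' ' = PySem.List.pyGetD xs r ' '
    · rw [if_neg (by simpa using hab), if_neg (by simpa using hab)]
      have harg : r + 1 - 1 = (r - 1) + 1 := by omega
      rw [harg]
      exact zhLoop_shift xs a b (l + 1) (r - 1) (by omega) (by omega)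
    · rw [if_pos (by simpa using hab), if_pos (by simpa using hab)]
  · have h1 : ¬ (l + 1 < r + 1) := by omega
    rw [if_neg h1, if_neg h]
termination_by (r - l).toNat
decreasing_by simp_wf; omega

-- the two-pointer loop decides the palindrome property
theorem zhLoop_pal (cs : List Char) :
    zhLoop cs 0 ((cs.length : Int) - 1) = decide (cs = cs.reverse) := by
  rcases cs with _ | ⟨a, t⟩
  · rw [zhLoop]; norm_num
  · rcases t.eq_nil_or_concat with rfl | ⟨ms, b, rfl⟩
    · rw [zhLoop]; norm_num
    · simp only [List.concat_eq_append]
      have hlen : ((a :: (ms ++ [b])).length : Int) - 1 = (ms.length : Int) + 1 := by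
        simp
      rw [zhLoop]
      rw [hlen]
      rw [if_pos (show (0 : Int) < (ms.length : Int) + 1 by omega)]
      have e1 : PySem.List.pyGetD (a :: (ms ++ [b])) 0 ' ' = a :=
        PySem.List.pyGetD_zero_cons ..
      have e2 : PySem.List.pyGetD (a :: (ms ++ [b])) ((ms.length : Int) + 1) ' ' = b := by
        rw [PySem.List.pyGetD_eq_getElem _ ' ' (by omega) (by simp)]
        have ht : ((ms.length : Int) + 1).toNat = ms.length + 1 := by omega
        simp [ht]
      rw [e1, e2]
      have hrev : (a :: (ms ++ [b])).reverse = b :: (ms.reverse ++ [a]) := by simp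
      by_cases hab : a = b
      · rw [if_neg (by simpa using hab)]
        subst hab
        have harg : (ms.length : Int) + 1 - 1 = (ms.length : Int) - 1 + 1 := by omega
        have hmid := zhLoop_shift ms a a 0 ((ms.length : Int) - 1) le_rfl (by omega)
        rw [harg, hmid, zhLoop_pal ms, hrev]
        have hiff : (a :: (ms ++ [a]) = a :: (ms.reverse ++ [a])) ↔ ms = ms.reverse := by
          simp
        rw [decide_eq_decide.mpr hiff]
      · rw [if_pos (by simpa using hab), hrev]
        have hne : ¬ (a :: (ms ++ [b]) = b :: (ms.reverse ++ [a])) := by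
          intro h
          exact hab (by injection h)
        rw [decide_eq_false hne]
termination_by cs.length

-- ===== VERDICT (by name: the statement is the Claim_ definition above) =====
theorem zhenghui_spec : Claim_equal_zhenghui := by
  intro ss typ _
  unfold Spec_zhenghui zhenghui zhenghui_alt
  rw [PySem.Str.slice?_none_none_neg_one]
  by_cases hm : PySem.Int.mod (PySem.Str.len ss) 2 = typ
  · rw [if_pos hm]
    show false = (decide (PySem.Int.mod (PySem.Str.len ss) 2 ≠ typ)
      && (ss == String.ofList ss.toList.reverse))
    rw [hm]
    simp
  · rw [if_neg hm]
    show zhLoop ss.toList 0 (PySem.Str.len ss - 1)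
      = (decide (PySem.Int.mod (PySem.Str.len ss) 2 ≠ typ)
        && (ss == String.ofList ss.toList.reverse))
    rw [decide_eq_true (show PySem.Int.mod (PySem.Str.len ss) 2 ≠ typ from hm), Bool.true_and]
    have hlen : PySem.Str.len ss = (ss.toList.length : Int) := by
      simp [PySem.Str.len_eq]
    rw [hlen, zhLoop_pal]
    by_cases h : ss.toList = ss.toList.reverse
    · have hs : ss = String.ofList ss.toList.reverse := by
        rw [← h, String.ofList_toList]
      rw [← hs, decide_eq_true h, beq_self_eq_true]
    · have hs : ss ≠ String.ofList ss.toList.reverse := by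
        intro he
        apply h
        conv_lhs => rw [he]
        simp
      rw [decide_eq_false h, beq_eq_false_iff_ne.mpr hs]
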